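-- pv_equiv track=rewrite | github.com/me0em/tgnews | language_classification.py | out_of_place_measure
-- ===== SOURCE A (Python) =====
-- def out_of_place_measure(phonemes, corpus_phonemes) -> int:
--     """ The measure between two sorted array of bi-grams.
--     The size of two arrays must be equal. The result will be
--     equal len(phonemes)^2 in the worst-case scenario.
--     """
--     distance = 0
--     for ph in phonemes:
--         if ph not in corpus_phonemes:
--             distance += len(corpus_phonemes)
--         else:
--             distance += abs(
--                 corpus_phonemes.index(ph)-phonemes.index(ph)
--             )
--     return distance
-- ===== SOURCE B (Python) =====
-- def out_of_place_measure(phonemes, corpus_phonemes) -> int: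
--     """Group-by reimplementation: one pass records each DISTINCT bigram's first
--     index and multiplicity, one pass records corpus first indices, then the sum
--     runs over distinct bigrams weighted by multiplicity (A scans per occurrence)."""
--     corpus_first = {}
--     for i, ph in enumerate(corpus_phonemes):
--         corpus_first.setdefault(ph, i)
--     groups = {}
--     for i, ph in enumerate(phonemes):
--         ip, cnt = groups.get(ph, (i, 0))
--         groups[ph] = (ip, cnt + 1)
--     n = len(corpus_phonemes)
--     total = 0
--     for ph, (ip, cnt) in groups.items():
--         if ph in corpus_first:
--             total += cnt * abs(corpus_first[ph] - ip)
--         else: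
--             total += cnt * n
--     return total
-- ===== Notes on version B (the rewrite author's own statement) =====
-- stated objective: faster
-- what changed: Replaces A's per-occurrence loop with repeated list scans by a group-by aggregation: one pass builds a dict of (first index, multiplicity) per distinct bigram and a corpus first-index dict, then a single sum over the distinct bigrams weighted by multiplicity.
import Mathlib
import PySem

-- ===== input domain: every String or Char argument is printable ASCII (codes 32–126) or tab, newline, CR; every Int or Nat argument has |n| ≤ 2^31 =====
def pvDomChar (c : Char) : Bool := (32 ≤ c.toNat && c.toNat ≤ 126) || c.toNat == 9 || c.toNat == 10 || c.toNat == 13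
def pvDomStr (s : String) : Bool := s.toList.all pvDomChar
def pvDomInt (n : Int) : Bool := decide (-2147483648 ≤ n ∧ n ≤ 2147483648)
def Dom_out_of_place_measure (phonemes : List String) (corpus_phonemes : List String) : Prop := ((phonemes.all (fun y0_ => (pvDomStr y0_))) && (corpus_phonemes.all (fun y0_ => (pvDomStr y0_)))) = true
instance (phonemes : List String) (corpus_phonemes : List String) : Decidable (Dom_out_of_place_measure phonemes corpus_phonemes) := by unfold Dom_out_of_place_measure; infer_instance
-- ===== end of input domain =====

-- B replaces A's per-occurrence loop (with list membership scans and repeated .index calls)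
-- by a group-by aggregation: first-index/multiplicity dicts built once, then one sum over
-- the DISTINCT bigrams weighted by multiplicity (objective: faster).

-- ===== PORT A =====
-- A: for each ph, membership test in corpus, then corpus.index(ph) and phonemes.index(ph).
-- The .index calls are guarded (ph ∈ corpus in the else branch, ph ∈ phonemes always), so getD 0 is never the default.
def out_of_place_measure (phonemes : List String) (corpus_phonemes : List String) : Int :=
  phonemes.foldl
    (fun distance ph =>
      if ¬ (ph ∈ corpus_phonemes) then
        distance + (corpus_phonemes.length : Int)
      else
        distance +
          (((((PySem.List.index? corpus_phonemes ph).getD 0 : Nat) : Int) -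
            (((PySem.List.index? phonemes ph).getD 0 : Nat) : Int)).natAbs : Int))
    0

-- ===== PORT B =====
-- for i, ph in enumerate(corpus_phonemes): corpus_first.setdefault(ph, i)
def pvCorpusFirst (xs : List String) : PySem.Dict String Int :=
  (PySem.List.enumerate xs 0).foldl (fun d p => d.setdefault p.2 p.1) PySem.Dict.empty

-- for i, ph in enumerate(phonemes): ip, cnt = groups.get(ph, (i, 0)); groups[ph] = (ip, cnt + 1)
def pvGroups (xs : List String) : PySem.Dict String (Int × Int) :=
  (PySem.List.enumerate xs 0).foldl
    (fun d p => d.insert p.2 ((d.getD p.2 (p.1, 0)).1, (d.getD p.2 (p.1, 0)).2 + 1))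
    PySem.Dict.empty

def out_of_place_measure_alt (phonemes : List String) (corpus_phonemes : List String) : Int :=
  let corpus_first := pvCorpusFirst corpus_phonemes
  let groups := pvGroups phonemes
  let n : Int := corpus_phonemes.length
  groups.items.foldl
    (fun total it =>
      if corpus_first.contains it.1 then
        total + it.2.2 * ((corpus_first.getD it.1 0 - it.2.1).natAbs : Int)
      else
        total + it.2.2 * n)
    0

-- ===== PRECONDITION & SPEC =====
def Spec_out_of_place_measure (phonemes : List String) (corpus_phonemes : List String) (out : Int) : Prop := out = out_of_place_measure_alt phonemes corpus_phonemes
instance (phonemes : List String) (corpus_phonemes : List String) (out : Int) : Decidable (Spec_out_of_place_measure phonemes corpus_phonemes out) := by unfold Spec_out_of_place_measure; infer_instance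

-- ===== CLAIM (what is proved, stated in full; the proofs are below) =====
def Claim_equal_out_of_place_measure : Prop := ∀ (phonemes : List String) (corpus_phonemes : List String), Dom_out_of_place_measure phonemes corpus_phonemes → Spec_out_of_place_measure phonemes corpus_phonemes (out_of_place_measure phonemes corpus_phonemes)

-- ===== LEMMAS AND PROOFS =====

-- the setdefault loop's lookup is exactly list.index (shifted by the enumerate start)
theorem pvCorpusFirst_get?_aux (v : String) :
    ∀ (xs : List String) (s : Int) (d : PySem.Dict String Int),
      ((PySem.List.enumerate xs s).foldl (fun d p => d.setdefault p.2 p.1) d).get? v =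
      if d.contains v then d.get? v
      else (PySem.List.index? xs v).map (fun n => s + (n : Int)) := by
  intro xs
  induction xs with
  | nil =>
      intro s d
      simp only [PySem.List.enumerate_nil, List.foldl_nil, PySem.List.index?_eq_idxOf?,
        List.idxOf?_nil]
      by_cases h : d.contains v = true
      · simp [h]
      · simp [h, (PySem.Dict.get?_eq_none_iff_contains d v).mpr (by simpa using h)]
  | cons x xs ih =>
      intro s d
      rw [PySem.List.enumerate_cons, List.foldl_cons]
      by_cases hx : d.contains x = true
      · rw [PySem.Dict.setdefault_of_contains _ _ hx, ih]
        by_cases hv : v = x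
        · subst hv
          simp [hx]
        · rw [PySem.List.index?_cons_of_ne xs (show x ≠ v from fun h => hv h.symm)]
          by_cases hdv : d.contains v = true
          · simp [hdv]
          · simp only [hdv, if_false, Bool.false_eq_true]
            cases h : PySem.List.index? xs v <;> simp <;> ring_nf
      · rw [PySem.Dict.setdefault_of_not_contains _ _ (by simpa using hx), ih]
        by_cases hv : v = x
        · subst hv
          rw [PySem.List.index?_cons_self]
          simp [PySem.Dict.get?_insert_self, hx]
        · rw [PySem.List.index?_cons_of_ne xs (show x ≠ v from fun h => hv h.symm)]
          have hcc : (d.insert x s).contains v = d.contains v := by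
            simp [PySem.Dict.contains_insert, hv]
          rw [hcc, PySem.Dict.get?_insert_of_ne d s hv]
          by_cases hdv : d.contains v = true
          · simp [hdv]
          · simp only [hdv, if_false, Bool.false_eq_true]
            cases h : PySem.List.index? xs v <;> simp <;> ring_nf

theorem pvCorpusFirst_get? (xs : List String) (v : String) :
    (pvCorpusFirst xs).get? v = (PySem.List.index? xs v).map (fun n => (n : Int)) := by
  rw [pvCorpusFirst, pvCorpusFirst_get?_aux]
  simp

theorem pvCorpusFirst_contains (xs : List String) (v : String) :
    (pvCorpusFirst xs).contains v = true ↔ v ∈ xs := by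
  rw [PySem.Dict.contains_eq_isSome_get?, pvCorpusFirst_get?]
  cases h : PySem.List.index? xs v with
  | none => simp [(PySem.List.index?_eq_none_iff xs v).mp h]
  | some k =>
      have hv : v ∈ xs := (PySem.List.index?_isSome_iff xs v).mp (by rw [h]; rfl)
      simp [hv]

-- the grouping loop stores (first index, multiplicity) for every distinct element
theorem pvGroups_get?_aux (v : String) :
    ∀ (xs : List String) (s : Int) (d : PySem.Dict String (Int × Int)),
      ((PySem.List.enumerate xs s).foldl
        (fun d p => d.insert p.2 ((d.getD p.2 (p.1, 0)).1, (d.getD p.2 (p.1, 0)).2 + 1)) d).get? v =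
      match d.get? v with
      | some q => some (q.1, q.2 + (xs.count v : Int))
      | none => (PySem.List.index? xs v).map (fun k => (s + (k : Int), (xs.count v : Int))) := by
  intro xs
  induction xs with
  | nil =>
      intro s d
      simp only [PySem.List.enumerate_nil, List.foldl_nil, PySem.List.index?_eq_idxOf?,
        List.idxOf?_nil, List.count_nil]
      cases h : d.get? v with
      | none => simp
      | some q => simp
  | cons x xs ih =>
      intro s d
      rw [PySem.List.enumerate_cons, List.foldl_cons, ih]
      by_cases hv : v = x
      · subst hv
        rw [PySem.Dict.get?_insert_self, PySem.List.index?_cons_self]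
        have hcnt : (v :: xs).count v = xs.count v + 1 := by
          simp [List.count_cons]
        cases h : d.get? v with
        | none =>
            have hD : d.getD v (s, 0) = (s, 0) := PySem.Dict.getD_of_get?_eq_none d _ h
            simp only [h, hD, hcnt]
            simp [Prod.ext_iff]
            push_cast
            ring_nf
        | some q =>
            have hD : d.getD v (s, 0) = q := PySem.Dict.getD_of_get?_eq_some d _ h
            simp only [h, hD, hcnt]
            simp [Prod.ext_iff]
            push_cast
            ring_nf
      · rw [PySem.Dict.get?_insert_of_ne d _ hv,
          PySem.List.index?_cons_of_ne xs (show x ≠ v from fun h => hv h.symm)]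
        have hcnt : (x :: xs).count v = xs.count v := by
          rw [List.count_cons]
          simp [show ¬ x = v from fun h => hv h.symm]
        cases h : d.get? v with
        | none =>
            simp only [h, hcnt]
            cases hI : PySem.List.index? xs v with
            | none => simp
            | some k => simp; ring_nf
        | some q => simp only [h, hcnt]

theorem pvGroups_get? (xs : List String) (v : String) :
    (pvGroups xs).get? v =
      (PySem.List.index? xs v).map (fun k => ((k : Int), (xs.count v : Int))) := by
  rw [pvGroups, pvGroups_get?_aux]
  simp [PySem.Dict.get?_empty]

theorem pvGroups_keys (xs : List String) : (pvGroups xs).keys = PySem.Set.ofList xs := by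
  rw [pvGroups,
    PySem.Dict.keys_foldl_insert_key (PySem.List.enumerate xs 0) (fun p => p.2)
      (fun d p => ((d.getD p.2 (p.1, 0)).1, (d.getD p.2 (p.1, 0)).2 + 1)) PySem.Dict.empty]
  simp [PySem.Dict.keys_empty, PySem.List.map_snd_enumerate, PySem.Set.update_nil_left]

theorem pvGroups_nodup_keys (xs : List String) : (pvGroups xs).keys.Nodup := by
  rw [pvGroups]
  exact PySem.Dict.nodup_keys_foldl_insert_key _ _ _ _ (by simp [PySem.Dict.nodup_keys_empty])

-- per-occurrence contribution of one bigram (the same term both programs add)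
def pvContrib (p c : List String) (x : String) : Int :=
  if x ∈ c then
    ((((PySem.List.index? c x).getD 0 : Nat) : Int) -
      (((PySem.List.index? p x).getD 0 : Nat) : Int)).natAbs
  else (c.length : Int)

-- group-by regroups the sum: per-occurrence sum = per-distinct-value sum weighted by count
theorem pvRegroup (xs : List String) (F : String → Int) :
    (xs.map F).sum = ((PySem.Set.ofList xs).map (fun k => (xs.count k : Int) * F k)).sum := by
  rw [Finset.sum_list_map_count xs F,
    ← List.sum_toFinset (fun k => (xs.count k : Int) * F k) (PySem.Set.nodup_ofList xs)]
  have hfs : (PySem.Set.ofList xs).toFinset = xs.toFinset := by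
    ext x; simp [PySem.Set.mem_ofList]
  rw [hfs]
  exact Finset.sum_congr rfl (fun m _ => by simp [nsmul_eq_mul])

-- ===== VERDICT (by name: the statement is the Claim_ definition above) =====
theorem out_of_place_measure_spec : Claim_equal_out_of_place_measure := by
  intro p c _
  unfold Spec_out_of_place_measure out_of_place_measure
  simp only [out_of_place_measure_alt]
  have hfun : (fun (distance : Int) (ph : String) =>
      if ¬ (ph ∈ c) then distance + (c.length : Int)
      else distance +
        (((((PySem.List.index? c ph).getD 0 : Nat) : Int) -
          (((PySem.List.index? p ph).getD 0 : Nat) : Int)).natAbs : Int)) =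
      (fun a x => a + pvContrib p c x) := by
    funext a x
    by_cases hc : x ∈ c
    · simp [pvContrib, hc]
    · simp [pvContrib, hc]
  rw [hfun, PySem.List.foldl_add, zero_add, pvRegroup p (pvContrib p c)]
  rw [PySem.Dict.items_eq_map_keys (pvGroups p) (pvGroups_nodup_keys p) ((0 : Int), (0 : Int)),
    List.foldl_map]
  have hB : (pvGroups p).keys.foldl
      (fun (x : Int) (y : String) =>
        if (pvCorpusFirst c).contains (y, (pvGroups p).getD y (0, 0)).1 = true then
          x + (y, (pvGroups p).getD y (0, 0)).2.2 *
            ((((pvCorpusFirst c).getD (y, (pvGroups p).getD y (0, 0)).1 0 -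
              (y, (pvGroups p).getD y (0, 0)).2.1).natAbs : Nat) : Int)
        else x + (y, (pvGroups p).getD y (0, 0)).2.2 * (c.length : Int)) 0 =
      (pvGroups p).keys.foldl
        (fun (x : Int) (y : String) => x + (p.count y : Int) * pvContrib p c y) 0 := by
    refine PySem.List.foldl_congr_mem _ _ _ _ (fun total k hk => ?_)
    have hkp : k ∈ p := by
      rw [pvGroups_keys] at hk
      exact (PySem.Set.mem_ofList p k).mp hk
    obtain ⟨ip, hip⟩ := Option.isSome_iff_exists.mp
      ((PySem.List.index?_isSome_iff p k).mpr hkp)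
    have hgD : (pvGroups p).getD k ((0 : Int), (0 : Int)) = ((ip : Int), (p.count k : Int)) := by
      rw [PySem.Dict.getD_eq_get?_getD, pvGroups_get?, hip]; rfl
    by_cases hc : k ∈ c
    · obtain ⟨ic, hic⟩ := Option.isSome_iff_exists.mp
        ((PySem.List.index?_isSome_iff c k).mpr hc)
      have h1 : (pvCorpusFirst c).contains k = true := (pvCorpusFirst_contains _ _).mpr hc
      have hcD : (pvCorpusFirst c).getD k 0 = (ic : Int) := by
        rw [PySem.Dict.getD_eq_get?_getD, pvCorpusFirst_get?, hic]; rfl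
      rw [PySem.List.index?_eq_idxOf?] at hip hic
      simp [h1, hgD, hcD, pvContrib, hc, hip, hic, mul_comm]
    · have h1 : (pvCorpusFirst c).contains k ≠ true := by
        simp [pvCorpusFirst_contains, hc]
      simp [h1, hgD, pvContrib, hc, mul_comm]
  rw [hB, PySem.List.foldl_add, zero_add, pvGroups_keys]
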